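-- pv_equiv track=rewrite | github.com/tiru-dmg/ML | ML2.py | learn
-- ===== SOURCE A (Python) =====
-- def learn(c, t):
--     s, g = c[0].copy(), [['?'] * len(c[0]) for _ in range(len(c[0]))]
--     for i, h in enumerate(c):
--         if t[i] == "yes":
--             for x in range(len(s)):
--                 if h[x] != s[x]: s[x], g[x][x] = '?', '?'
--         else:
--             for x in range(len(s)):
--                 g[x][x] = s[x] if h[x] != s[x] else '?'
--     return s, [h for h in g if h != ['?'] * len(s)]
-- ===== SOURCE B (Python) =====
-- def learn(c, t):
--     n = len(c[0])
--     s = list(c[0])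
--     last_neg = None
--     for h, lab in zip(c, t):
--         if lab == "yes":
--             s = [sv if hv == sv else '?' for sv, hv in zip(s, h)]
--         else:
--             last_neg = h
--     g = []
--     if last_neg is not None:
--         for x in range(n):
--             if s[x] != '?' and last_neg[x] != s[x]:
--                 row = ['?'] * n
--                 row[x] = s[x]
--                 g.append(row)
--     return s, g
-- ===== Notes on version B (the rewrite author's own statement) =====
-- stated objective: alternative
-- what changed: B never materialises the n-by-n matrix g: a single fold computes the specific hypothesis s and remembers only the LAST negative example, then one pass per attribute emits a general-hypothesis row directly when s[x]!='?' and the last negative disagrees there; A instead mutates an n-by-n diagonal matrix on every example and filters it at the end.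
-- outside the precondition, e.g. on learn([], []): A raises IndexError, B raises IndexError
import Mathlib
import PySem

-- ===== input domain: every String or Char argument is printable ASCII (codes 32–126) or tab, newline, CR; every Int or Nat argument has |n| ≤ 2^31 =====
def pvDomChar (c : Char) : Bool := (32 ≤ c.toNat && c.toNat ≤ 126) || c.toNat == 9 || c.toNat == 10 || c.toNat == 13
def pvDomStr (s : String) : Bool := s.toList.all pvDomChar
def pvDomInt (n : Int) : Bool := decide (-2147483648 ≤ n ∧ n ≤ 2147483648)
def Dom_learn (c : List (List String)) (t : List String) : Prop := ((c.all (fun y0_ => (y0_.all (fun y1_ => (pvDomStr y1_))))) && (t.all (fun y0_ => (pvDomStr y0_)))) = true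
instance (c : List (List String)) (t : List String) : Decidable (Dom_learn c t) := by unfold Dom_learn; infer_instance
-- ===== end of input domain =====

-- B replaces A's mutated n×n diagonal matrix g by one fold computing s plus the last
-- negative example, then emits the general rows directly in a single per-attribute pass.

-- ===== PORT A =====
-- all indices below come from range(len(..)) / enumerate, hence are nonnegative:
-- Nat-indexed l[x]? / l.set are exact for Python l[x] / l[x]=v there (none = IndexError).

-- g[x][x] = v  (IndexError when x out of range, as in Python)
def learnGSet (g : List (List String)) (x : Nat) (v : String) : Option (List (List String)) :=
  match g[x]? with
  | none => none
  | some row => if x < row.length then some (g.set x (row.set x v)) else none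

-- inner loop of the positive ("yes") branch, over the index list range(len(s))
def learnPos (h : List String) : List Nat → List String × List (List String) →
    Option (List String × List (List String))
  | [], sg => some sg
  | x :: xs, (s, g) =>
    match h[x]?, s[x]? with
    | some hv, some sv =>
      if hv ≠ sv then
        match learnGSet g x "?" with
        | some g' => learnPos h xs (s.set x "?", g')
        | none => none
      else learnPos h xs (s, g)
    | _, _ => none

-- inner loop of the negative branch
def learnNeg (h : List String) : List Nat → List String × List (List String) →
    Option (List String × List (List String))
  | [], sg => some sg
  | x :: xs, (s, g) =>
    match h[x]?, s[x]? with
    | some hv, some sv =>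
      match learnGSet g x (if hv ≠ sv then sv else "?") with
      | some g' => learnNeg h xs (s, g')
      | none => none
    | _, _ => none

-- 'for i, h in enumerate(c)' as recursion over c carrying the counter i; t[i] may raise
def learnMain (t : List String) : List (List String) → Nat →
    List String × List (List String) → Option (List String × List (List String))
  | [], _, sg => some sg
  | h :: rest, i, (s, g) =>
    match t[i]? with
    | none => none
    | some lab =>
      if lab = "yes" then
        match learnPos h (List.range s.length) (s, g) with
        | some sg' => learnMain t rest (i + 1) sg'
        | none => none
      else
        match learnNeg h (List.range s.length) (s, g) with
        | some sg' => learnMain t rest (i + 1) sg'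
        | none => none

def learn (c : List (List String)) (t : List String) : List String × List (List String) :=
  match c with
  | [] => ([], [])  -- Python: c[0] raises IndexError (excluded by Pre_learn)
  | c0 :: _ =>
    let g0 := (List.range c0.length).map (fun _ => List.replicate c0.length "?")
    match learnMain t c 0 (c0, g0) with
    | some (s, g) => (s, g.filter (fun row => decide (row ≠ List.replicate s.length "?")))
    | none => ([], [])  -- an index raised inside the loop (excluded by Pre_learn)

-- ===== PORT B =====
-- second pass of B: for x in range(n), emit a row when s[x] != '?' and the last
-- negative example disagrees at x (s[x]?, hneg[x]? : IndexError = none, as in Python)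
def learnAltRows (s hneg : List String) (n : Nat) : List Nat → Option (List (List String))
  | [] => some []
  | x :: xs =>
    match s[x]? with
    | none => none
    | some sv =>
      if sv ≠ "?" then
        match hneg[x]? with
        | none => none
        | some hv =>
          if hv ≠ sv then
            match learnAltRows s hneg n xs with
            | some r => some ((List.replicate n "?").set x sv :: r)
            | none => none
          else learnAltRows s hneg n xs
      else learnAltRows s hneg n xs

def learn_alt (c : List (List String)) (t : List String) : List String × List (List String) :=
  match c with
  | [] => ([], [])  -- Python: len(c[0]) raises IndexError (excluded by Pre_learn)
  | c0 :: _ =>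
    let n := c0.length
    let r := (c.zip t).foldl
      (fun (acc : List String × Option (List String)) p =>
        if p.2 = "yes" then ((acc.1.zip p.1).map (fun q => if q.2 = q.1 then q.1 else "?"), acc.2)
        else (acc.1, some p.1))
      (c0, none)
    match r.2 with
    | none => (r.1, [])
    | some hneg =>
      match learnAltRows r.1 hneg n (List.range n) with
      | some g => (r.1, g)
      | none => ([], [])  -- an index raised (excluded by Pre_learn)

-- ===== PRECONDITION & SPEC =====
-- Pre_learn = exactly the inputs where the Python A returns: c nonempty (c[0]),
-- a label t[i] for every example, and every row at least as long as c[0] (h[x]).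
def Pre_learn (c : List (List String)) (t : List String) : Prop :=
  c ≠ [] ∧ c.length ≤ t.length ∧ ∀ h ∈ c, (c.headD []).length ≤ h.length

instance (c : List (List String)) (t : List String) : Decidable (Pre_learn c t) := by
  unfold Pre_learn; infer_instance

def pvWitness_learn : List (List String) × List String :=
  ([["a", "b"], ["a", "c"]], ["yes", "no"])

def Spec_learn (c : List (List String)) (t : List String) (out : List String × List (List String)) : Prop := out = learn_alt c t
instance (c : List (List String)) (t : List String) (out : List String × List (List String)) : Decidable (Spec_learn c t out) := by unfold Spec_learn; infer_instance

-- ===== CLAIM (what is proved, stated in full; the proofs are below) =====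
def Claim_equal_learn : Prop := ∀ (c : List (List String)) (t : List String), Dom_learn c t → Pre_learn c t → Spec_learn c t (learn c t)

-- ===== LEMMAS AND PROOFS =====

-- the value A's matrix g carries on its diagonal at column x, given the current s and
-- the last negative example seen so far (none = no negative example yet)
def FV (s : List String) (ln : Option (List String)) (x : Nat) : String :=
  match ln with
  | none => "?"
  | some h => if h.getD x "" ≠ s.getD x "" then s.getD x "" else "?"

-- the shape A's g always has: row x is all-'?' except position x
def mkG (n : Nat) (f : Nat → String) : List (List String) :=
  (List.range n).map (fun x => (List.replicate n "?").set x (f x))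

-- B's fold step over (example, label) pairs
def bStep (acc : List String × Option (List String)) (p : List String × String) :
    List String × Option (List String) :=
  if p.2 = "yes" then ((acc.1.zip p.1).map (fun q => if q.2 = q.1 then q.1 else "?"), acc.2)
  else (acc.1, some p.1)

-- what the positive inner loop does to s, index by index
def posApply (h : List String) (xs : List Nat) (s : List String) : List String :=
  xs.foldl (fun s x => if h.getD x "" ≠ s.getD x "" then s.set x "?" else s) s

def zipMap (s h : List String) : List String :=
  (s.zip h).map (fun q => if q.2 = q.1 then q.1 else "?")

lemma mkG_congr {n : Nat} {f f' : Nat → String} (hf : ∀ x < n, f x = f' x) :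
    mkG n f = mkG n f' := by
  unfold mkG
  exact List.map_congr_left (fun x hx => by rw [hf x (List.mem_range.mp hx)])

lemma gset_mkG {n x : Nat} (f : Nat → String) (v : String) (hx : x < n) :
    learnGSet (mkG n f) x v = some (mkG n (fun y => if y = x then v else f y)) := by
  unfold learnGSet mkG
  have hg : ((List.range n).map (fun x => (List.replicate n "?").set x (f x)))[x]? =
      some ((List.replicate n "?").set x (f x)) := by
    simp [hx]
  rw [hg]
  dsimp only
  rw [List.length_set, List.length_replicate, if_pos hx]
  congr 1
  apply List.ext_getElem?
  intro y
  by_cases hxy : y = x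
  · subst hxy
    rw [List.getElem?_set_self (by simpa using hx)]
    simp [hx, List.set_set]
  · rw [List.getElem?_set_ne (by omega)]
    by_cases hy : y < n
    · simp [hy, hxy]
    · simp [hy]

lemma FV_set (s : List String) (ln : Option (List String)) {n x : Nat}
    (hs : s.length = n) (hx : x < n) :
    ∀ y < n, (fun y => if y = x then "?" else FV s ln y) y = FV (s.set x "?") ln y := by
  intro y _
  by_cases hxy : y = x
  · subst hxy
    simp only
    unfold FV
    cases ln with
    | none => rfl
    | some h =>
      have : (s.set y "?").getD y "" = "?" := by
        unfold List.getD
        rw [List.getElem?_set_self (by omega)]; rfl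
      rw [this]
      by_cases hh : h.getD y "" ≠ "?" <;> simp
  · simp only [if_neg hxy]
    unfold FV
    cases ln with
    | none => rfl
    | some h =>
      have : (s.set x "?").getD y "" = s.getD y "" := by
        unfold List.getD
        rw [List.getElem?_set_ne (by omega)]
      rw [this]

lemma getElem?_eq_getD {α : Type} [Inhabited α] (l : List α) (x : Nat) (hx : x < l.length) (d : α) :
    l[x]? = some (l.getD x d) := by
  unfold List.getD
  rw [List.getElem?_eq_getElem hx]
  rfl

lemma posLoop_inv (h : List String) (ln : Option (List String)) (n : Nat)
    (hh : n ≤ h.length) :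
    ∀ (xs : List Nat) (s : List String), (∀ x ∈ xs, x < n) → s.length = n →
      learnPos h xs (s, mkG n (FV s ln)) =
        some (posApply h xs s, mkG n (FV (posApply h xs s) ln)) := by
  intro xs
  induction xs with
  | nil => intro s _ _; simp [learnPos, posApply]
  | cons x xs ih =>
    intro s hxs hs
    have hx : x < n := hxs x (List.mem_cons_self ..)
    have hxh : h[x]? = some (h.getD x "") := getElem?_eq_getD h x (by omega) ""
    have hxs' : s[x]? = some (s.getD x "") := getElem?_eq_getD s x (by omega) ""
    show learnPos h (x :: xs) (s, mkG n (FV s ln)) = _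
    rw [learnPos, hxh, hxs']
    dsimp only
    by_cases hne : h.getD x "" ≠ s.getD x ""
    · rw [if_pos hne, gset_mkG (FV s ln) "?" hx]
      dsimp only
      rw [mkG_congr (FV_set s ln hs hx)]
      rw [ih (s.set x "?") (fun y hy => hxs y (List.mem_cons_of_mem _ hy)) (by simp [hs])]
      have : posApply h (x :: xs) s = posApply h xs (s.set x "?") := by
        unfold posApply
        simp only [List.foldl_cons]
        rw [if_pos hne]
      rw [this]
    · rw [if_neg hne, ih s (fun y hy => hxs y (List.mem_cons_of_mem _ hy)) hs]
      have : posApply h (x :: xs) s = posApply h xs s := by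
        unfold posApply
        simp only [List.foldl_cons]
        rw [if_neg hne]
      rw [this]

lemma negLoop_inv (h : List String) (n : Nat) (hh : n ≤ h.length) :
    ∀ (xs : List Nat) (f : Nat → String) (s : List String),
      (∀ x ∈ xs, x < n) → s.length = n →
      learnNeg h xs (s, mkG n f) =
        some (s, mkG n (fun y => if y ∈ xs then FV s (some h) y else f y)) := by
  intro xs
  induction xs with
  | nil => intro f s _ _; simp [learnNeg]
  | cons x xs ih =>
    intro f s hxs hs
    have hx : x < n := hxs x (List.mem_cons_self ..)
    have hxh : h[x]? = some (h.getD x "") := getElem?_eq_getD h x (by omega) ""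
    have hxs' : s[x]? = some (s.getD x "") := getElem?_eq_getD s x (by omega) ""
    rw [learnNeg, hxh, hxs']
    dsimp only
    have hv : (if h.getD x "" ≠ s.getD x "" then s.getD x "" else "?") = FV s (some h) x := by
      unfold FV; rfl
    rw [hv, gset_mkG f (FV s (some h) x) hx]
    dsimp only
    rw [ih (fun y => if y = x then FV s (some h) x else f y) s
        (fun y hy => hxs y (List.mem_cons_of_mem _ hy)) hs]
    congr 1
    ext1
    congr 1
    apply mkG_congr
    intro y _
    by_cases hmem : y ∈ xs
    · simp [hmem]
    · by_cases hxy : y = x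
      · subst hxy; simp [hmem]
      · simp [hmem, hxy]

lemma posApply_map_succ (hb : String) (h' : List String) :
    ∀ (xs : List Nat) (b : String) (s' : List String),
      posApply (hb :: h') (xs.map Nat.succ) (b :: s') = b :: posApply h' xs s' := by
  intro xs
  induction xs with
  | nil => intro b s'; simp [posApply]
  | cons x xs ih =>
    intro b s'
    unfold posApply
    simp only [List.map_cons, List.foldl_cons]
    have h1 : (hb :: h').getD (Nat.succ x) "" = h'.getD x "" := by
      unfold List.getD; simp
    have h2 : (b :: s').getD (Nat.succ x) "" = s'.getD x "" := by
      unfold List.getD; simp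
    rw [h1, h2]
    by_cases hne : h'.getD x "" ≠ s'.getD x ""
    · rw [if_pos hne, if_pos hne]
      have h3 : (b :: s').set (Nat.succ x) "?" = b :: s'.set x "?" := rfl
      rw [h3]
      exact ih b (s'.set x "?")
    · rw [if_neg hne, if_neg hne]
      exact ih b s'

lemma posApply_range_zipMap :
    ∀ (s h : List String), s.length ≤ h.length →
      posApply h (List.range s.length) s = zipMap s h := by
  intro s
  induction s with
  | nil => intro h _; simp [posApply, zipMap]
  | cons a s' ih =>
    intro h hlen
    cases h with
    | nil => simp at hlen
    | cons hb h' =>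
      rw [List.length_cons, List.range_succ_eq_map]
      have h1 : (hb :: h').getD 0 "" = hb := by unfold List.getD; simp
      have h2 : (a :: s').getD 0 "" = a := by unfold List.getD; simp
      have hihlen : s'.length ≤ h'.length := by simpa using hlen
      have step : posApply (hb :: h') (0 :: (List.range s'.length).map Nat.succ) (a :: s') =
          posApply (hb :: h') ((List.range s'.length).map Nat.succ)
            (if (hb :: h').getD 0 "" ≠ (a :: s').getD 0 "" then (a :: s').set 0 "?" else (a :: s')) := rfl
      rw [h1, h2] at step
      have hzip : zipMap (a :: s') (hb :: h') = (if hb = a then a else "?") :: zipMap s' h' := by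
        unfold zipMap; rw [List.zip_cons_cons, List.map_cons]
      by_cases hne : hb ≠ a
      · rw [step, if_pos hne, show (a :: s').set 0 "?" = "?" :: s' from rfl,
          posApply_map_succ hb h' (List.range s'.length) "?" s', ih h' hihlen, hzip,
          if_neg (by tauto : ¬ hb = a)]
      · rw [step, if_neg hne, posApply_map_succ hb h' (List.range s'.length) a s',
          ih h' hihlen, hzip, if_pos (by tauto : hb = a)]

lemma zipMap_length (s h : List String) (hlen : s.length ≤ h.length) :
    (zipMap s h).length = s.length := by
  unfold zipMap
  simp [List.length_zip]
  omega

lemma main_inv (t : List String) (n : Nat) :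
    ∀ (cs : List (List String)) (i : Nat) (s : List String) (ln : Option (List String)),
      s.length = n →
      (∀ h ∈ cs, n ≤ h.length) →
      i + cs.length ≤ t.length →
      learnMain t cs i (s, mkG n (FV s ln)) =
        some (((cs.zip (t.drop i)).foldl bStep (s, ln)).1,
          mkG n (FV ((cs.zip (t.drop i)).foldl bStep (s, ln)).1
                    ((cs.zip (t.drop i)).foldl bStep (s, ln)).2)) := by
  intro cs
  induction cs with
  | nil => intro i s ln hs _ _; simp [learnMain]
  | cons h rest ih =>
    intro i s ln hs hrows hlen
    have hit : i < t.length := by simp at hlen; omega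
    have hdrop : t.drop i = t[i] :: t.drop (i + 1) := List.drop_eq_getElem_cons hit
    have hti : t[i]? = some t[i] := List.getElem?_eq_getElem hit
    rw [learnMain, hti]
    dsimp only
    have hrange : ∀ x ∈ List.range s.length, x < n := by
      intro x hx; rw [hs] at hx; exact List.mem_range.mp hx
    have hhlen : n ≤ h.length := hrows h (List.mem_cons_self ..)
    by_cases hyes : t[i] = "yes"
    · rw [if_pos hyes]
      rw [posLoop_inv h ln n hhlen (List.range s.length) s hrange hs]
      dsimp only
      have hpa : posApply h (List.range s.length) s = zipMap s h := by
        have := posApply_range_zipMap s h (by omega)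
        rwa [hs] at this ⊢
      rw [hpa]
      rw [ih (i + 1) (zipMap s h) ln (by rw [zipMap_length s h (by omega), hs])
        (fun h' hh' => hrows h' (List.mem_cons_of_mem _ hh')) (by simp at hlen ⊢; omega)]
      rw [hdrop, List.zip_cons_cons, List.foldl_cons]
      have hb : bStep (s, ln) (h, t[i]) = (zipMap s h, ln) := by
        unfold bStep zipMap; simp [hyes]
      rw [hb]
    · rw [if_neg hyes]
      rw [negLoop_inv h n hhlen (List.range s.length) (FV s ln) s hrange hs]
      dsimp only
      have hg : mkG n (fun y => if y ∈ List.range s.length then FV s (some h) y else FV s ln y)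
          = mkG n (FV s (some h)) := by
        apply mkG_congr
        intro y hy
        rw [if_pos (by rw [hs]; exact List.mem_range.mpr hy)]
      rw [hg]
      rw [ih (i + 1) s (some h) hs
        (fun h' hh' => hrows h' (List.mem_cons_of_mem _ hh')) (by simp at hlen ⊢; omega)]
      rw [hdrop, List.zip_cons_cons, List.foldl_cons]
      have hb : bStep (s, ln) (h, t[i]) = (s, some h) := by
        unfold bStep; simp [hyes]
      rw [hb]

lemma bFold_snd : ∀ (l : List (List String × String)) (st : List String × Option (List String)),
    (l.foldl bStep st).2 = st.2 ∨ ∃ p ∈ l, (l.foldl bStep st).2 = some p.1 := by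
  intro l
  induction l with
  | nil => intro st; left; rfl
  | cons p l ih =>
    intro st
    rw [List.foldl_cons]
    by_cases hyes : p.2 = "yes"
    · have hb : (bStep st p).2 = st.2 := by unfold bStep; rw [if_pos hyes]
      rcases ih (bStep st p) with h | ⟨q, hq, hval⟩
      · left; rw [h, hb]
      · right; exact ⟨q, List.mem_cons_of_mem _ hq, hval⟩
    · have hb : (bStep st p).2 = some p.1 := by unfold bStep; rw [if_neg hyes]
      rcases ih (bStep st p) with h | ⟨q, hq, hval⟩
      · right; exact ⟨p, List.mem_cons_self .., by rw [h, hb]⟩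
      · right; exact ⟨q, List.mem_cons_of_mem _ hq, hval⟩

lemma bFold_fst_length (n : Nat) :
    ∀ (l : List (List String × String)) (st : List String × Option (List String)),
      st.1.length = n → (∀ p ∈ l, n ≤ p.1.length) → (l.foldl bStep st).1.length = n := by
  intro l
  induction l with
  | nil => intro st h _; exact h
  | cons p l ih =>
    intro st hst hl
    rw [List.foldl_cons]
    apply ih
    · unfold bStep
      by_cases hyes : p.2 = "yes"
      · simp only [hyes]
        have := zipMap_length st.1 p.1 (by rw [hst]; exact hl p (List.mem_cons_self ..))
        unfold zipMap at this
        simpa [hst] using this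
      · rw [if_neg hyes]; exact hst
    · exact fun q hq => hl q (List.mem_cons_of_mem _ hq)

lemma set_replicate_self (n x : Nat) (a : String) :
    (List.replicate n a).set x a = List.replicate n a := by
  apply List.ext_getElem?
  intro y
  by_cases hxy : y = x
  · subst hxy
    by_cases hy : y < n
    · rw [List.getElem?_set_self (by simpa using hy)]
      simp [hy]
    · rw [List.getElem?_set]
      simp [hy]
  · rw [List.getElem?_set_ne (by omega)]

lemma row_ne_replicate {n x : Nat} (v : String) (hx : x < n) :
    ((List.replicate n "?").set x v ≠ List.replicate n "?") ↔ v ≠ "?" := by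
  constructor
  · intro hne hv
    subst hv
    exact hne (set_replicate_self n x "?")
  · intro hv hne
    apply hv
    have := congrArg (fun l => l.getD x "") hne
    simp only [List.getD] at this
    rw [List.getElem?_set_self (by simpa using hx), List.getElem?_replicate, if_pos hx] at this
    simpa using this

lemma filter_mkG (n : Nat) (f : Nat → String) :
    (mkG n f).filter (fun row => decide (row ≠ List.replicate n "?")) =
      ((List.range n).filter (fun x => decide (f x ≠ "?"))).map
        (fun x => (List.replicate n "?").set x (f x)) := by
  unfold mkG
  rw [List.filter_map]
  congr 1
  apply List.filter_congr
  intro x hx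
  have hxn : x < n := List.mem_range.mp hx
  simp only [Function.comp]
  by_cases hv : f x = "?"
  · simp [hv]
  · simp [hv, (row_ne_replicate (f x) hxn).mpr hv]

lemma altRows_spec (s hneg : List String) (n : Nat)
    (hs : s.length = n) (hh : n ≤ hneg.length) :
    ∀ (xs : List Nat), (∀ x ∈ xs, x < n) →
      learnAltRows s hneg n xs =
        some ((xs.filter (fun x => decide (FV s (some hneg) x ≠ "?"))).map
          (fun x => (List.replicate n "?").set x (FV s (some hneg) x))) := by
  intro xs
  induction xs with
  | nil => intro _; simp [learnAltRows]
  | cons x xs ih =>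
    intro hxs
    have hx : x < n := hxs x (List.mem_cons_self ..)
    have hxs' : s[x]? = some (s.getD x "") := getElem?_eq_getD s x (by omega) ""
    have hxh : hneg[x]? = some (hneg.getD x "") := getElem?_eq_getD hneg x (by omega) ""
    have hFV : FV s (some hneg) x =
        if hneg.getD x "" ≠ s.getD x "" then s.getD x "" else "?" := rfl
    rw [learnAltRows, hxs']
    dsimp only
    by_cases hsv : s.getD x "" ≠ "?"
    · rw [if_pos hsv, hxh]
      dsimp only
      by_cases hne : hneg.getD x "" ≠ s.getD x ""
      · rw [if_pos hne]
        rw [ih (fun y hy => hxs y (List.mem_cons_of_mem _ hy))]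
        have hFVx : FV s (some hneg) x = s.getD x "" := by rw [hFV, if_pos hne]
        have hkeep : decide (FV s (some hneg) x ≠ "?") = true := by
          rw [hFVx]; simpa using hsv
        rw [List.filter_cons, hkeep]
        simp [hFVx]
      · rw [if_neg hne]
        rw [ih (fun y hy => hxs y (List.mem_cons_of_mem _ hy))]
        have hFVx : FV s (some hneg) x = "?" := by rw [hFV, if_neg hne]
        have hdrop : decide (FV s (some hneg) x ≠ "?") = false := by simp [hFVx]
        rw [List.filter_cons, hdrop]
        simp
    · rw [if_neg hsv]
      rw [not_not] at hsv
      rw [ih (fun y hy => hxs y (List.mem_cons_of_mem _ hy))]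
      have hFVx : FV s (some hneg) x = "?" := by
        rw [hFV, hsv]
        by_cases hq : hneg.getD x "" ≠ "?" <;> simp
      have hdrop : decide (FV s (some hneg) x ≠ "?") = false := by simp [hFVx]
      rw [List.filter_cons, hdrop]
      simp

-- ===== VERDICT (by name: the statement is the Claim_ definition above) =====
theorem learn_spec : Claim_equal_learn := by
  intro c t _ hpre
  obtain ⟨hne, hlen, hrows⟩ := hpre
  unfold Spec_learn
  cases c with
  | nil => exact absurd rfl hne
  | cons c0 cs =>
    simp only [List.headD_cons] at hrows
    set n := c0.length with hn
    have hg0 : (List.range c0.length).map (fun _ => List.replicate c0.length "?")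
        = mkG n (FV c0 none) := by
      apply List.map_congr_left
      intro x hx
      rw [show FV c0 none x = "?" from rfl, set_replicate_self]
    have hmain := main_inv t n (c0 :: cs) 0 c0 none rfl hrows (by simpa using hlen)
    rw [List.drop_zero] at hmain
    set r := (((c0 :: cs).zip t).foldl bStep (c0, none)) with hr
    have hSlen : r.1.length = n := bFold_fst_length n ((c0 :: cs).zip t) (c0, none) rfl
      (fun p hp => hrows p.1 (List.of_mem_zip hp).1)
    -- reduce both sides
    show (match c0 :: cs with
      | [] => (([] : List String), ([] : List (List String)))
      | c0 :: _ =>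
        let g0 := (List.range c0.length).map (fun _ => List.replicate c0.length "?")
        match learnMain t (c0 :: cs) 0 (c0, g0) with
        | some (s, g) => (s, g.filter (fun row => decide (row ≠ List.replicate s.length "?")))
        | none => ([], [])) = learn_alt (c0 :: cs) t
    simp only
    rw [hg0, hmain]
    simp only
    unfold learn_alt
    simp only
    have hfold : ((c0 :: cs).zip t).foldl
        (fun (acc : List String × Option (List String)) p =>
          if p.2 = "yes" then ((acc.1.zip p.1).map (fun q => if q.2 = q.1 then q.1 else "?"), acc.2)
          else (acc.1, some p.1)) (c0, none) = r := by
      rw [hr]; rfl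
    rw [hfold, hSlen]
    cases hln : r.2 with
    | none =>
      simp only
      congr 1
      rw [filter_mkG]
      have hnil : (List.range n).filter (fun x => decide (FV r.1 none x ≠ "?")) = [] := by
        apply List.filter_eq_nil_iff.mpr
        intro x _
        simp [FV]
      rw [hnil, List.map_nil]
    | some hneg =>
      have hhneg : n ≤ hneg.length := by
        rcases bFold_snd ((c0 :: cs).zip t) (c0, none) with h | ⟨p, hp, hval⟩
        · rw [← hr] at h; rw [hln] at h; simp at h
        · rw [← hr] at hval; rw [hln] at hval
          have heq : hneg = p.1 := by
            injection hval with h'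
          rw [heq]
          exact hrows p.1 (List.of_mem_zip hp).1
      dsimp only
      rw [← hn]
      rw [altRows_spec r.1 hneg n hSlen hhneg (List.range n)
        (fun x hx => List.mem_range.mp hx)]
      dsimp only
      congr 1
      rw [filter_mkG]
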